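-- pv_equiv track=rewrite | github.com/janulka93/ukol07 | had.py | nakresli_mapu
-- ===== SOURCE A (Python) =====
-- def nakresli_mapu(souradnice, velikost):
--     '''Vytvoří mapu.'''
--     radky = []
--     for j in range(velikost):
--         radek = []
--         for i in range(velikost):
--             if (i, j) in souradnice:
--                 radek.append('X')
--             else:
--                 radek.append('.')
--         radky.append(radek)
--
--     return radky
-- ===== SOURCE B (Python) =====
-- def nakresli_mapu(souradnice, velikost):
--     '''Vytvoří mapu.'''
--     radky = [['.'] * velikost for _ in range(velikost)]
--     for i, j in souradnice:
--         if 0 <= i < velikost and 0 <= j < velikost: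
--             radky[j][i] = 'X'
--     return radky
-- ===== Notes on version B (the rewrite author's own statement) =====
-- stated objective: alternative
-- what changed: Instead of scanning every cell and testing membership in souradnice, B builds a grid of '.' once and scatters 'X' in one pass over souradnice (skipping out-of-range coordinates).
import Mathlib
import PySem

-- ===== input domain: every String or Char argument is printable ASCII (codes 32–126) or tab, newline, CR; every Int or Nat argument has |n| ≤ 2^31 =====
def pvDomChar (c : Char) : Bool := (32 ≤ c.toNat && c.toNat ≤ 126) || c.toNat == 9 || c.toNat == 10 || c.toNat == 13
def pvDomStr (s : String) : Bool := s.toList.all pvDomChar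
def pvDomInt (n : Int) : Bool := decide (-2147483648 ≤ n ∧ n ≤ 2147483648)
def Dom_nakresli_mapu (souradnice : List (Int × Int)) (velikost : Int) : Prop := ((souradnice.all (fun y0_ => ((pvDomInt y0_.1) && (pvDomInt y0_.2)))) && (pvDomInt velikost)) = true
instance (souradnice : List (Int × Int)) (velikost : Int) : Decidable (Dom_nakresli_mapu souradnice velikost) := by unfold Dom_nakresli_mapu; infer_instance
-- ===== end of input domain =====

-- B replaces A's membership test at every cell by building a '.'-grid once and scattering 'X' per coordinate of souradnice.


-- ===== PORT A =====
def nakresli_mapu (souradnice : List (Int × Int)) (velikost : Int) : List (List String) :=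
  (PySem.List.pyRange 0 velikost 1).foldl (fun radky j =>
    radky ++ [(PySem.List.pyRange 0 velikost 1).foldl (fun radek i =>
      radek ++ [if (i, j) ∈ souradnice then "X" else "."]) []]) []

-- ===== PORT B =====
-- one scatter step: mark cell (i, j) = (p.1, p.2) if it lies inside the grid
def pvScatter (velikost : Int) (radky : List (List String)) (p : Int × Int) : List (List String) :=
  if 0 ≤ p.1 ∧ p.1 < velikost ∧ 0 ≤ p.2 ∧ p.2 < velikost then
    radky.modify p.2.toNat (fun radek => radek.set p.1.toNat "X")
  else radky

def nakresli_mapu_alt (souradnice : List (Int × Int)) (velikost : Int) : List (List String) :=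
  souradnice.foldl (pvScatter velikost)
    (List.replicate velikost.toNat (List.replicate velikost.toNat "."))

-- ===== PRECONDITION & SPEC =====
def Spec_nakresli_mapu (souradnice : List (Int × Int)) (velikost : Int) (out : List (List String)) : Prop := out = nakresli_mapu_alt souradnice velikost
instance (souradnice : List (Int × Int)) (velikost : Int) (out : List (List String)) : Decidable (Spec_nakresli_mapu souradnice velikost out) := by unfold Spec_nakresli_mapu; infer_instance

-- ===== CLAIM (what is proved, stated in full; the proofs are below) =====
def Claim_equal_nakresli_mapu : Prop := ∀ (souradnice : List (Int × Int)) (velikost : Int), Dom_nakresli_mapu souradnice velikost → Spec_nakresli_mapu souradnice velikost (nakresli_mapu souradnice velikost)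

-- ===== LEMMAS AND PROOFS =====

-- append-fold is map
theorem pv_foldl_append_map {α β : Type} (f : α → β) (l : List α) (acc : List β) :
    l.foldl (fun r x => r ++ [f x]) acc = acc ++ l.map f := by
  induction l generalizing acc with
  | nil => simp
  | cons x xs ih => simp [List.foldl, ih]

-- A's result in canonical map form
theorem pv_A_canon (souradnice : List (Int × Int)) (velikost : Int) :
    nakresli_mapu souradnice velikost =
      (PySem.List.pyRange 0 velikost 1).map (fun j =>
        (PySem.List.pyRange 0 velikost 1).map (fun i =>
          if (i, j) ∈ souradnice then "X" else ".")) := by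
  unfold nakresli_mapu
  rw [pv_foldl_append_map, List.nil_append]
  refine List.map_congr_left fun j _ => ?_
  rw [pv_foldl_append_map, List.nil_append]

-- getD through List.modify / List.set, with an in-bounds index
theorem pv_getD_modify (g : List (List String)) (f : List String → List String)
    (k j : Nat) (hj : j < g.length) :
    (g.modify k f).getD j [] = if k = j then f (g[j]'hj) else g.getD j [] := by
  rw [List.getD_eq_getElem (g.modify k f) [] (by rw [List.length_modify]; exact hj),
    List.getElem_modify]
  split
  · rfl
  · rw [List.getD_eq_getElem g [] hj]

theorem pv_getD_set (r : List String) (k i : Nat) (a d : String) (hi : i < r.length) :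
    (r.set k a).getD i d = if k = i then a else r.getD i d := by
  rw [List.getD_eq_getElem (r.set k a) d (by rw [List.length_set]; exact hi),
    List.getElem_set]
  split
  · rfl
  · rw [List.getD_eq_getElem r d hi]

-- invariant of the scatter fold: shape preserved; a cell is "X" iff its
-- coordinate occurs in the remaining list, else it keeps its old value
theorem pv_B_inv (n : Nat) (s : List (Int × Int)) :
    ∀ (g : List (List String)), g.length = n → (∀ row ∈ g, row.length = n) →
      (s.foldl (pvScatter (n : Int)) g).length = n ∧
      (∀ row ∈ s.foldl (pvScatter (n : Int)) g, row.length = n) ∧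
      ∀ j i, j < n → i < n →
        (((s.foldl (pvScatter (n : Int)) g).getD j []).getD i "?") =
          (if ((i : Int), (j : Int)) ∈ s then "X" else ((g.getD j []).getD i "?")) := by
  induction s with
  | nil =>
    intro g hg hrow
    refine ⟨hg, hrow, fun j i hj hi => by simp⟩
  | cons p rest ih =>
    intro g hg hrow
    have hlen' : (pvScatter (n : Int) g p).length = n := by
      unfold pvScatter; split <;> simp [hg]
    have hrow' : ∀ row ∈ pvScatter (n : Int) g p, row.length = n := by
      unfold pvScatter; split
      · intro row hmem
        rw [List.mem_iff_getElem] at hmem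
        obtain ⟨k, hk, rfl⟩ := hmem
        rw [List.getElem_modify]
        split
        · rw [List.length_set]
          exact hrow _ (List.getElem_mem _)
        · exact hrow _ (List.getElem_mem _)
      · exact hrow
    obtain ⟨h1, h2, h3⟩ := ih (pvScatter (n : Int) g p) hlen' hrow'
    refine ⟨by simpa using h1, by simpa using h2, fun j i hj hi => ?_⟩
    have hjg : j < g.length := by omega
    have hig : i < (g.getD j []).length := by
      rw [List.getD_eq_getElem g [] hjg]
      have := hrow _ (List.getElem_mem hjg)
      omega
    have hrowstep : (pvScatter (n : Int) g p).getD j [] =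
        if (0 ≤ p.1 ∧ p.1 < (n : Int) ∧ 0 ≤ p.2 ∧ p.2 < (n : Int)) ∧ p.2.toNat = j then
          (g.getD j []).set p.1.toNat "X"
        else g.getD j [] := by
      unfold pvScatter
      by_cases hb : 0 ≤ p.1 ∧ p.1 < (n : Int) ∧ 0 ≤ p.2 ∧ p.2 < (n : Int)
      · rw [if_pos hb, pv_getD_modify g _ p.2.toNat j hjg]
        by_cases hjj : p.2.toNat = j
        · rw [if_pos hjj, if_pos ⟨hb, hjj⟩, List.getD_eq_getElem g [] hjg]
        · rw [if_neg hjj, if_neg (fun hc => hjj hc.2)]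
      · rw [if_neg hb, if_neg (fun hc => hb hc.1)]
    have hstep : (((pvScatter (n : Int) g p).getD j []).getD i "?") =
        if p = ((i : Int), (j : Int)) then "X" else ((g.getD j []).getD i "?") := by
      rw [hrowstep]
      by_cases hc : (0 ≤ p.1 ∧ p.1 < (n : Int) ∧ 0 ≤ p.2 ∧ p.2 < (n : Int)) ∧ p.2.toNat = j
      · rw [if_pos hc, pv_getD_set _ _ i "X" "?" hig]
        by_cases hii : p.1.toNat = i
        · have hp : p = ((i : Int), (j : Int)) := by
            obtain ⟨⟨hb1, _, hb3, _⟩, hjj⟩ := hc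
            exact Prod.ext (by omega) (by omega)
          rw [if_pos hii, if_pos hp]
        · have hpne : ¬ p = ((i : Int), (j : Int)) := by
            rintro rfl; simp at hii
          rw [if_neg hii, if_neg hpne]
      · have hpne : ¬ p = ((i : Int), (j : Int)) := by
          rintro rfl
          exact hc ⟨⟨Int.natCast_nonneg i, show (i : Int) < (n : Int) by exact_mod_cast hi,
            Int.natCast_nonneg j, show (j : Int) < (n : Int) by exact_mod_cast hj⟩, by simp⟩
        rw [if_neg hc, if_neg hpne]
    rw [List.foldl_cons, h3 j i hj hi, hstep]
    by_cases hmem : ((i : Int), (j : Int)) ∈ rest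
    · simp [hmem, List.mem_cons]
    · by_cases hp2 : p = ((i : Int), (j : Int)) <;>
        simp [hmem, hp2, List.mem_cons, eq_comm]

-- ===== VERDICT (by name: the statement is the Claim_ definition above) =====
theorem nakresli_mapu_spec : Claim_equal_nakresli_mapu := by
  intro souradnice velikost _
  unfold Spec_nakresli_mapu nakresli_mapu_alt
  have hv : pvScatter velikost = pvScatter ((velikost.toNat : Int)) := by
    by_cases h : 0 ≤ velikost
    · rw [Int.toNat_of_nonneg h]
    · funext g p
      unfold pvScatter
      have hz : ((velikost.toNat : Int)) = 0 := by omega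
      rw [hz]
      split <;> split <;> first | rfl | omega
  rw [pv_A_canon, hv]
  obtain ⟨h1, h2, h3⟩ := pv_B_inv velikost.toNat souradnice
    (List.replicate velikost.toNat (List.replicate velikost.toNat "."))
    (by simp) (fun row h => by simp [List.eq_of_mem_replicate h])
  set F := souradnice.foldl (pvScatter ((velikost.toNat : Int)))
    (List.replicate velikost.toNat (List.replicate velikost.toNat ".")) with hF
  apply List.ext_getElem
  · rw [List.length_map, h1, PySem.List.pyRange_one, List.length_map, List.length_range]
    omega
  intro j hj hj'
  apply List.ext_getElem
  · rw [List.getElem_map, List.length_map, h2 _ (List.getElem_mem hj'),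
      PySem.List.pyRange_one, List.length_map, List.length_range]
    omega
  intro i hi hi'
  have hjn : j < velikost.toNat := by rw [h1] at hj'; exact hj'
  have hin : i < velikost.toNat := by
    have := h2 _ (List.getElem_mem hj')
    omega
  have hg := h3 j i hjn hin
  rw [List.getD_eq_getElem F [] hj'] at hg
  rw [List.getD_eq_getElem (F[j]'hj') "?" hi'] at hg
  rw [List.getD_eq_getElem (List.replicate velikost.toNat (List.replicate velikost.toNat "."))
      [] (by simpa using hjn), List.getElem_replicate] at hg
  rw [List.getD_eq_getElem (List.replicate velikost.toNat ".") "?" (by simpa using hin),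
      List.getElem_replicate] at hg
  simp only [List.getElem_map, PySem.List.pyRange_one, List.getElem_range]
  rw [hg]
  norm_num
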